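-- pv_equiv track=rewrite | github.com/Pratz2005/Logbook-Automation | backend/functions/build_docx.py | _parse_section_c
-- ===== SOURCE A (Python) =====
-- SECTION_C_SUBHEADINGS = [
--     "Key Achievements",
--     "Main Challenge Faced",
--     "What I Did Well",
--     "Areas for Improvement",
-- ]
--
-- def _parse_section_c(text: str) -> list[dict]:
--     """
--     Parse Section C into paragraph segments for rendering.
--
--     Claude outputs subheadings on their own line followed by the content.
--     We merge them inline to match the PDF format:
--       {'type': 'mixed',   'bold_text': 'Key Achievements:', 'rest': ' The past two weeks...'}
--       {'type': 'regular', 'text': '...'}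
--     """
--     lines = [ln.strip() for ln in text.strip().split("\n")]
--     out   = []
--     i     = 0
--
--     while i < len(lines):
--         line = lines[i]
--         if not line:
--             i += 1
--             continue
--
--         matched = next(
--             (sh for sh in SECTION_C_SUBHEADINGS if line.lower().startswith(sh.lower())),
--             None,
--         )
--
--         if matched:
--             after = line[len(matched):].lstrip(":").strip()
--
--             if after:
--                 # "Key Achievements: content on same line"
--                 out.append({"type": "mixed",
--                             "bold_text": matched + ":",
--                             "rest": " " + after})
--                 i += 1
--             else:
--                 # Subheading alone — look ahead for next non-empty, non-subheading line
--                 j = i + 1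
--                 while j < len(lines) and not lines[j].strip():
--                     j += 1
--
--                 is_next_subheading = j < len(lines) and any(
--                     lines[j].lower().startswith(sh.lower())
--                     for sh in SECTION_C_SUBHEADINGS
--                 )
--
--                 if j < len(lines) and not is_next_subheading:
--                     out.append({"type": "mixed",
--                                 "bold_text": matched + ":",
--                                 "rest": " " + lines[j].strip()})
--                     i = j + 1
--                 else:
--                     out.append({"type": "bold", "text": matched + ":"})
--                     i += 1
--         else:
--             out.append({"type": "regular", "text": line})
--             i += 1
--
--     return out
-- ===== SOURCE B (Python) =====
-- SECTION_C_SUBHEADINGS = [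
--     "Key Achievements",
--     "Main Challenge Faced",
--     "What I Did Well",
--     "Areas for Improvement",
-- ]
--
-- def _parse_section_c(text: str) -> list[dict]:
--     # Different algorithm: after dropping blank lines, traverse the segments
--     # RIGHT-TO-LEFT with a fold, building the output back-to-front.  The state
--     # carries `pending`: the raw text of out[0] iff it is a plain (non-subheading)
--     # segment that a preceding lone subheading may absorb.  A lone subheading
--     # then absorbs it by replacing out[0] in O(1) — no forward lookahead scan.
--     segs = [ln.strip() for ln in text.strip().split("\n") if ln.strip()]
--     out = []
--     pending = None
--     for seg in reversed(segs):
--         matched = next(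
--             (sh for sh in SECTION_C_SUBHEADINGS
--              if seg.lower().startswith(sh.lower())),
--             None,
--         )
--         if matched is None:
--             out.insert(0, {"type": "regular", "text": seg})
--             pending = seg
--         else:
--             rest = seg[len(matched):].lstrip(":").strip()
--             if rest:
--                 out.insert(0, {"type": "mixed",
--                                "bold_text": matched + ":",
--                                "rest": " " + rest})
--             elif pending is not None:
--                 out[0] = {"type": "mixed",
--                           "bold_text": matched + ":",
--                           "rest": " " + pending}
--             else:
--                 out.insert(0, {"type": "bold", "text": matched + ":"})
--             pending = None
--     return out
-- ===== Notes on version B (the rewrite author's own statement) =====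
-- stated objective: alternative
-- what changed: B pre-filters blank lines and then folds over the segments right-to-left, building the output back-to-front with a pending-absorbable-segment state that lets a lone subheading absorb the following plain line in O(1), instead of A's forward index loop with an inline empty-skip loop and a separate j-lookahead scan.
import Mathlib
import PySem

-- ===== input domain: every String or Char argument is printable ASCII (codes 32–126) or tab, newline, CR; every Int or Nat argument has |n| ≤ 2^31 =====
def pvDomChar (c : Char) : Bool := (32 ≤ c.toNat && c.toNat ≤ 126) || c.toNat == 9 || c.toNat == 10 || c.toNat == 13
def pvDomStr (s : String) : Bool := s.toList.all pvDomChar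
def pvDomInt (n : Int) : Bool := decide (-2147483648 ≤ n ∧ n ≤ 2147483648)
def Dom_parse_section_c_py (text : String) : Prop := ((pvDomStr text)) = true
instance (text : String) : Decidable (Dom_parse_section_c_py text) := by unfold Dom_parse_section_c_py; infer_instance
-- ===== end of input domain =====

-- B drops blank lines up front and then folds over the segments RIGHT-TO-LEFT with a
-- pending-absorbable-segment state instead of A's forward index loop with lookahead scans
-- (objective: alternative).

-- ===== PORT A =====
-- module constant SECTION_C_SUBHEADINGS
def pvSubheadings : List String :=
  ["Key Achievements", "Main Challenge Faced", "What I Did Well", "Areas for Improvement"]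

-- next((sh for sh in SECTION_C_SUBHEADINGS if line.lower().startswith(sh.lower())), None)
def pvMatch (line : String) : Option String :=
  pvSubheadings.find? (fun sh => PySem.Str.startswith (PySem.Str.lower line) (PySem.Str.lower sh))

-- line[len(matched):].lstrip(":").strip()
-- (str.lstrip(":") has no PySem primitive; dropWhile (· == ':') is exact: it removes
-- exactly the leading ':' characters, as Python's lstrip(":") does)
def pvAfter (line m : String) : String :=
  PySem.Str.strip (String.ofList ((line.toList.drop m.toList.length).dropWhile (· == ':')))

-- inner `while j < len(lines) and not lines[j].strip(): j += 1`, on the suffix after i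
-- (the lines are already stripped, so lines[j].strip() is falsy iff lines[j] is "")
def pvSkipA : List String → List String
  | [] => []
  | x :: xs => if x = "" then pvSkipA xs else x :: xs

theorem pvSkipA_length_le (l : List String) : (pvSkipA l).length ≤ l.length := by
  induction l with
  | nil => simp [pvSkipA]
  | cons x xs ih => by_cases h : x = "" <;> (simp [pvSkipA, h]; try omega)

-- the `while i < len(lines)` loop of A, as structural recursion on the suffix from i
def pvLoopA : List String → List (List (String × String))
  | [] => []
  | line :: rest =>
    if line = "" then pvLoopA rest
    else
      match pvMatch line with
      | some m =>
        if pvAfter line m ≠ "" then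
          [("type", "mixed"), ("bold_text", m ++ ":"),
           ("rest", " " ++ pvAfter line m)] :: pvLoopA rest
        else
          match h : pvSkipA rest with
          | [] => [("type", "bold"), ("text", m ++ ":")] :: pvLoopA rest
          | nxt :: rest2 =>
            if (pvMatch nxt).isSome then
              [("type", "bold"), ("text", m ++ ":")] :: pvLoopA rest
            else
              [("type", "mixed"), ("bold_text", m ++ ":"),
               ("rest", " " ++ PySem.Str.strip nxt)] :: pvLoopA rest2
      | none => [("type", "regular"), ("text", line)] :: pvLoopA rest
  termination_by l => l.length
  decreasing_by
    all_goals (try (have hle := pvSkipA_length_le rest; rw [h] at hle; simp at hle))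
    all_goals (simp; try omega)

def parse_section_c_py (text : String) : List (List (String × String)) :=
  pvLoopA (((PySem.Str.split? (PySem.Str.strip text) "\n").getD []).map PySem.Str.strip)

-- ===== PORT B =====
-- one step of B's `for seg in reversed(segs)` loop; the state is (pending, out):
-- pending = the raw text of out[0] iff out[0] is an absorbable plain segment
def pvStepB (seg : String) (st : Option String × List (List (String × String))) :
    Option String × List (List (String × String)) :=
  match pvMatch seg with
  | none => (some seg, [("type", "regular"), ("text", seg)] :: st.2)
  | some m =>
    if pvAfter seg m ≠ "" then
      (none, [("type", "mixed"), ("bold_text", m ++ ":"),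
              ("rest", " " ++ pvAfter seg m)] :: st.2)
    else
      match st.1 with
      | some t =>
        -- lone subheading absorbs the pending plain segment: out[0] is replaced
        (none, [("type", "mixed"), ("bold_text", m ++ ":"),
                ("rest", " " ++ t)] :: st.2.drop 1)
      | none => (none, [("type", "bold"), ("text", m ++ ":")] :: st.2)

-- segs = [ln.strip() for ln in text.strip().split("\n") if ln.strip()];
-- `for seg in reversed(segs): state = step` is List.foldr pvStepB over segs
def parse_section_c_py_alt (text : String) : List (List (String × String)) :=
  (List.foldr pvStepB (none, [])
    ((((PySem.Str.split? (PySem.Str.strip text) "\n").getD []).map PySem.Str.strip).filter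
      (fun s => s ≠ ""))).2

-- ===== PRECONDITION & SPEC =====
def Spec_parse_section_c_py (text : String) (out : List (List (String × String))) : Prop := out = parse_section_c_py_alt text
instance (text : String) (out : List (List (String × String))) : Decidable (Spec_parse_section_c_py text out) := by unfold Spec_parse_section_c_py; infer_instance

-- ===== CLAIM (what is proved, stated in full; the proofs are below) =====
def Claim_equal_parse_section_c_py : Prop := ∀ (text : String), Dom_parse_section_c_py text → Spec_parse_section_c_py text (parse_section_c_py text)

-- ===== LEMMAS AND PROOFS =====

-- proof-only forward characterisation of B's fold: the single forward pass with one lookahead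
def pvFwd : List String → List (List (String × String))
  | [] => []
  | seg :: rest =>
    match pvMatch seg with
    | none => [("type", "regular"), ("text", seg)] :: pvFwd rest
    | some m =>
      if pvAfter seg m ≠ "" then
        [("type", "mixed"), ("bold_text", m ++ ":"),
         ("rest", " " ++ pvAfter seg m)] :: pvFwd rest
      else
        match rest with
        | [] => [("type", "bold"), ("text", m ++ ":")] :: pvFwd ([] : List String)
        | nxt :: rest2 =>
          if (pvMatch nxt).isSome then
            [("type", "bold"), ("text", m ++ ":")] :: pvFwd (nxt :: rest2)
          else
            [("type", "mixed"), ("bold_text", m ++ ":"),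
             ("rest", " " ++ nxt)] :: pvFwd rest2
  termination_by l => l.length
  decreasing_by all_goals (simp; try omega)

-- the pending component of B's fold, characterised by the head of the segment list
def pvPendOf : List String → Option String
  | [] => none
  | t :: _ => if pvMatch t = none then some t else none

-- unfolding equations for pvFwd's branches
theorem fwd_nil : pvFwd [] = [] := by rw [pvFwd.eq_def]

theorem fwd_reg (seg : String) (rest : List String) (hm : pvMatch seg = none) :
    pvFwd (seg :: rest) = [("type", "regular"), ("text", seg)] :: pvFwd rest := by
  rw [pvFwd.eq_def]; dsimp only; rw [hm]

theorem fwd_mixed (seg m : String) (rest : List String) (hm : pvMatch seg = some m)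
    (ha : pvAfter seg m ≠ "") :
    pvFwd (seg :: rest) =
      [("type", "mixed"), ("bold_text", m ++ ":"),
       ("rest", " " ++ pvAfter seg m)] :: pvFwd rest := by
  rw [pvFwd.eq_def]; dsimp only; rw [hm]; dsimp only; rw [if_pos ha]

theorem fwd_bold_nil (seg m : String) (hm : pvMatch seg = some m)
    (ha : ¬ pvAfter seg m ≠ "") :
    pvFwd [seg] = [[("type", "bold"), ("text", m ++ ":")]] := by
  rw [pvFwd.eq_def]; dsimp only; rw [hm]; dsimp only; rw [if_neg ha, fwd_nil]

theorem fwd_bold_sub (seg m nxt : String) (rest2 : List String) (hm : pvMatch seg = some m)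
    (ha : ¬ pvAfter seg m ≠ "") (hns : (pvMatch nxt).isSome) :
    pvFwd (seg :: nxt :: rest2) =
      [("type", "bold"), ("text", m ++ ":")] :: pvFwd (nxt :: rest2) := by
  rw [pvFwd.eq_def]; dsimp only; rw [hm]; dsimp only; rw [if_neg ha]
  rw [if_pos hns]

theorem fwd_merge (seg m nxt : String) (rest2 : List String) (hm : pvMatch seg = some m)
    (ha : ¬ pvAfter seg m ≠ "") (hns : ¬ (pvMatch nxt).isSome) :
    pvFwd (seg :: nxt :: rest2) =
      [("type", "mixed"), ("bold_text", m ++ ":"),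
       ("rest", " " ++ nxt)] :: pvFwd rest2 := by
  rw [pvFwd.eq_def]; dsimp only; rw [hm]; dsimp only; rw [if_neg ha]
  rw [if_neg hns]

theorem foldrB_eq (segs : List String) :
    List.foldr pvStepB (none, []) segs = (pvPendOf segs, pvFwd segs) := by
  induction segs with
  | nil => rw [fwd_nil]; rfl
  | cons seg rest ih =>
    rw [List.foldr_cons, ih]
    cases hm : pvMatch seg with
    | none =>
      rw [fwd_reg seg rest hm]
      simp [pvStepB, hm, pvPendOf]
    | some m =>
      by_cases ha : pvAfter seg m ≠ ""
      · rw [fwd_mixed seg m rest hm ha]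
        simp [pvStepB, hm, ha, pvPendOf]
      · cases rest with
        | nil =>
          rw [fwd_bold_nil seg m hm ha, fwd_nil]
          simp [pvStepB, hm, ha, pvPendOf]
        | cons nxt rest2 =>
          by_cases hn : pvMatch nxt = none
          · rw [fwd_merge seg m nxt rest2 hm ha (by simp [hn]),
              fwd_reg nxt rest2 hn]
            simp [pvStepB, hm, ha, pvPendOf, hn]
          · have hns : (pvMatch nxt).isSome := by
              cases h : pvMatch nxt with
              | none => exact absurd h hn
              | some _ => simp
            rw [fwd_bold_sub seg m nxt rest2 hm ha hns]
            simp [pvStepB, hm, ha, pvPendOf, hn]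

-- unfolding equations for pvLoopA's six branches
theorem loopA_nil : pvLoopA [] = [] := by simp [pvLoopA]

theorem loopA_empty (rest : List String) : pvLoopA ("" :: rest) = pvLoopA rest := by
  rw [pvLoopA.eq_def]; dsimp only; rw [if_pos rfl]

theorem loopA_reg (line : String) (rest : List String) (hl : line ≠ "")
    (hm : pvMatch line = none) :
    pvLoopA (line :: rest) = [("type", "regular"), ("text", line)] :: pvLoopA rest := by
  rw [pvLoopA.eq_def]; dsimp only; rw [if_neg hl, hm]

theorem loopA_mixed (line m : String) (rest : List String) (hl : line ≠ "")
    (hm : pvMatch line = some m) (ha : pvAfter line m ≠ "") :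
    pvLoopA (line :: rest) =
      [("type", "mixed"), ("bold_text", m ++ ":"),
       ("rest", " " ++ pvAfter line m)] :: pvLoopA rest := by
  rw [pvLoopA.eq_def]; dsimp only; rw [if_neg hl, hm]; dsimp only; rw [if_pos ha]

theorem loopA_bold_nil (line m : String) (rest : List String) (hl : line ≠ "")
    (hm : pvMatch line = some m) (ha : ¬ pvAfter line m ≠ "")
    (hs : pvSkipA rest = []) :
    pvLoopA (line :: rest) = [("type", "bold"), ("text", m ++ ":")] :: pvLoopA rest := by
  rw [pvLoopA.eq_def]; dsimp only; rw [if_neg hl, hm]; dsimp only; rw [if_neg ha]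
  split
  · rfl
  · rename_i nxt rest2 heq; rw [hs] at heq; exact absurd heq (by simp)

theorem loopA_bold_sub (line m nxt : String) (rest rest2 : List String) (hl : line ≠ "")
    (hm : pvMatch line = some m) (ha : ¬ pvAfter line m ≠ "")
    (hs : pvSkipA rest = nxt :: rest2) (hns : (pvMatch nxt).isSome) :
    pvLoopA (line :: rest) = [("type", "bold"), ("text", m ++ ":")] :: pvLoopA rest := by
  rw [pvLoopA.eq_def]; dsimp only; rw [if_neg hl, hm]; dsimp only; rw [if_neg ha]
  split
  · rename_i heq; simp [hs] at heq
  · rename_i nxt' rest2' heq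
    rw [hs] at heq; injection heq with h1 h2; subst h1; subst h2
    rw [if_pos hns]

theorem loopA_merge (line m nxt : String) (rest rest2 : List String) (hl : line ≠ "")
    (hm : pvMatch line = some m) (ha : ¬ pvAfter line m ≠ "")
    (hs : pvSkipA rest = nxt :: rest2) (hns : ¬ (pvMatch nxt).isSome) :
    pvLoopA (line :: rest) =
      [("type", "mixed"), ("bold_text", m ++ ":"),
       ("rest", " " ++ PySem.Str.strip nxt)] :: pvLoopA rest2 := by
  rw [pvLoopA.eq_def]; dsimp only; rw [if_neg hl, hm]; dsimp only; rw [if_neg ha]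
  split
  · rename_i heq; simp [hs] at heq
  · rename_i nxt' rest2' heq
    rw [hs] at heq; injection heq with h1 h2; subst h1; subst h2
    rw [if_neg hns]

-- pvSkipA is dropWhile (· = ""), hence a suffix with a non-"" head
theorem pvSkipA_eq_dropWhile (l : List String) : pvSkipA l = l.dropWhile (· = "") := by
  induction l with
  | nil => rfl
  | cons x xs ih => by_cases h : x = "" <;> simp [pvSkipA, List.dropWhile, h, ih]

theorem pvSkipA_suffix (l : List String) : pvSkipA l <:+ l := by
  rw [pvSkipA_eq_dropWhile]; exact List.dropWhile_suffix _

theorem pvSkipA_head_ne (l : List String) {x : String} {xs : List String}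
    (h : pvSkipA l = x :: xs) : x ≠ "" := by
  induction l with
  | nil => simp [pvSkipA] at h
  | cons y ys ih =>
    by_cases hy : y = ""
    · exact ih (by simpa [pvSkipA, hy] using h)
    · simp [pvSkipA, hy] at h; rw [← h.1]; exact hy

theorem filter_skipA (l : List String) :
    l.filter (fun s => s ≠ "") = (pvSkipA l).filter (fun s => s ≠ "") := by
  induction l with
  | nil => rfl
  | cons x xs ih =>
    by_cases h : x = ""
    · simp [pvSkipA, h]; simpa using ih
    · simp [pvSkipA, h]

-- strip is idempotent (needed because A re-strips the already-stripped lookahead line)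
theorem dropWhile_of_prefix_dropWhile {α : Type} (p : α → Bool) (l x : List α)
    (h : x <+: l.dropWhile p) : x.dropWhile p = x := by
  cases x with
  | nil => rfl
  | cons a as =>
    obtain ⟨t, ht⟩ := h
    have hd : l.dropWhile p = a :: (as ++ t) := by rw [← ht]; simp
    have hidem := List.dropWhile_idempotent (p := p) (l := l)
    rw [List.dropWhile_eq_self_iff] at hidem
    have h0 : 0 < (l.dropWhile p).length := by rw [hd]; simp
    have hnp : ¬ p a := by
      have := hidem h0
      simpa [hd] using this
    simp [hnp]

theorem chars_lstrip_eq (cs : List Char) :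
    PySem.Chars.lstrip cs = cs.dropWhile PySem.Chars.isspace := rfl

theorem chars_rstrip_eq (cs : List Char) :
    PySem.Chars.rstrip cs = cs.rdropWhile PySem.Chars.isspace := rfl

theorem chars_strip_idem (cs : List Char) :
    PySem.Chars.strip (PySem.Chars.strip cs) = PySem.Chars.strip cs := by
  show PySem.Chars.rstrip (PySem.Chars.lstrip (PySem.Chars.rstrip (PySem.Chars.lstrip cs)))
      = PySem.Chars.rstrip (PySem.Chars.lstrip cs)
  have h1 : PySem.Chars.lstrip (PySem.Chars.rstrip (PySem.Chars.lstrip cs))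
      = PySem.Chars.rstrip (PySem.Chars.lstrip cs) := by
    apply dropWhile_of_prefix_dropWhile PySem.Chars.isspace cs
    rw [chars_rstrip_eq, chars_lstrip_eq]
    exact List.rdropWhile_prefix _ _
  rw [h1, chars_rstrip_eq, chars_rstrip_eq, List.rdropWhile_idempotent]

theorem str_strip_idem (s : String) :
    PySem.Str.strip (PySem.Str.strip s) = PySem.Str.strip s := by
  have h : (PySem.Str.strip (PySem.Str.strip s)).toList = (PySem.Str.strip s).toList := by
    simp [chars_strip_idem]
  exact String.toList_inj.mp h

-- the main loop equivalence: A's loop on all lines = the forward pass on the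
-- non-empty lines, provided every line is already stripped
theorem loopA_eq_fwd (l : List String) (hstr : ∀ s ∈ l, PySem.Str.strip s = s) :
    pvLoopA l = pvFwd (l.filter (fun s => s ≠ "")) := by
  induction hn : l.length using Nat.strong_induction_on generalizing l with
  | _ n ih =>
  cases l with
  | nil => simp [loopA_nil, pvFwd]
  | cons line rest =>
    simp only [List.length_cons] at hn
    have hrest : ∀ s ∈ rest, PySem.Str.strip s = s :=
      fun s hs => hstr s (List.mem_cons_of_mem _ hs)
    have ihrest : pvLoopA rest = pvFwd (rest.filter (fun s => s ≠ "")) :=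
      ih rest.length (by omega) rest hrest rfl
    by_cases hline : line = ""
    · subst hline
      rw [loopA_empty, ihrest]
      simp
    · have hfilt : (line :: rest).filter (fun s => s ≠ "") =
          line :: rest.filter (fun s => s ≠ "") := by simp [hline]
      rw [hfilt]
      cases hm : pvMatch line with
      | none =>
        rw [loopA_reg line rest hline hm, pvFwd.eq_def]; dsimp only; rw [hm, ihrest]
      | some m =>
        by_cases ha : pvAfter line m ≠ ""
        · rw [loopA_mixed line m rest hline hm ha, pvFwd.eq_def]; dsimp only
          rw [hm]; dsimp only; rw [if_pos ha, ihrest]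
        · cases hs : pvSkipA rest with
          | nil =>
            have hfr : rest.filter (fun s => s ≠ "") = [] := by
              rw [filter_skipA, hs]; rfl
            rw [loopA_bold_nil line m rest hline hm ha hs, pvFwd.eq_def]; dsimp only
            rw [hm]; dsimp only; rw [if_neg ha, hfr]
            rw [ihrest, hfr]
          | cons nxt rest2 =>
            have hnxtne : nxt ≠ "" := pvSkipA_head_ne rest hs
            have hfr : rest.filter (fun s => s ≠ "") =
                nxt :: rest2.filter (fun s => s ≠ "") := by
              rw [filter_skipA, hs]; simp [hnxtne]
            have hsuf : (nxt :: rest2) <:+ rest := hs ▸ pvSkipA_suffix rest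
            have hlen2 : rest2.length < n := by
              have := hsuf.length_le; simp at this; omega
            have hrest2 : ∀ s ∈ rest2, PySem.Str.strip s = s :=
              fun s hs' => hrest s (hsuf.subset (List.mem_cons_of_mem _ hs'))
            have ihrest2 : pvLoopA rest2 = pvFwd (rest2.filter (fun s => s ≠ "")) :=
              ih rest2.length hlen2 rest2 hrest2 rfl
            by_cases hns : (pvMatch nxt).isSome
            · rw [loopA_bold_sub line m nxt rest rest2 hline hm ha hs hns,
                pvFwd.eq_def]; dsimp only
              rw [hm]; dsimp only; rw [if_neg ha, hfr]; dsimp only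
              rw [if_pos hns, ihrest, hfr]
            · have hstripnxt : PySem.Str.strip nxt = nxt :=
                hrest nxt (hsuf.subset List.mem_cons_self)
              rw [loopA_merge line m nxt rest rest2 hline hm ha hs hns,
                pvFwd.eq_def]; dsimp only
              rw [hm]; dsimp only; rw [if_neg ha, hfr]; dsimp only
              rw [if_neg hns, hstripnxt, ihrest2]

-- ===== VERDICT (by name: the statement is the Claim_ definition above) =====
theorem parse_section_c_py_spec : Claim_equal_parse_section_c_py := by
  intro text _
  unfold Spec_parse_section_c_py parse_section_c_py parse_section_c_py_alt
  rw [foldrB_eq]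
  apply loopA_eq_fwd
  intro s hs
  simp only [List.mem_map] at hs
  obtain ⟨x, _, hx⟩ := hs
  rw [← hx]; exact str_strip_idem x
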